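-- pv_equiv track=rewrite | github.com/anmaricdev/Thesis-Bachelor | Bin Packing Algorithms/WorstFit.py | bin_packing_worst_fit_var_capa
-- ===== SOURCE A (Python) =====
-- def bin_packing_worst_fit_var_capa(bin_capacities, elements):
--     max_capacity = max(bin_capacities)
--     m = len(bin_capacities)
--     n = len(elements)
--     bins = [[] for _ in range(m)]
--     bins_in_use = [i for i in range(m)]
--     for elem in elements:
--         # search for bin in use where it fits worst
--         worst_bin = -1
--         worst_remaining_capacity = -1
--         for i in range(len(bins_in_use)):
--             remaining_capacity = bin_capacities[bins_in_use[i]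
--                                                 ] - (sum(bins[bins_in_use[i]]) + elem)
--             if remaining_capacity >= 0 and \
--                remaining_capacity > worst_remaining_capacity:
--                 worst_bin = bins_in_use[i]
--                 worst_remaining_capacity = remaining_capacity
--         # found?
--         if worst_bin != -1:
--             bins[worst_bin] += [elem]
--             # is this bin full now?
--             if worst_remaining_capacity == 0:
--                 bins_in_use.remove(worst_bin)
--         else:
--             return False, bins
--     return True, bins
-- ===== SOURCE B (Python) =====
-- def _insort(s, q):
--     # binary search for q's insertion point in the ascending list s
--     # (all cells have distinct bin indices, so keys are distinct)
--     lo, hi = 0, len(s)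
--     while lo < hi:
--         mid = (lo + hi) // 2
--         if s[mid] < q:
--             lo = mid + 1
--         else:
--             hi = mid
--     s.insert(lo, q)
--
--
-- def bin_packing_worst_fit_var_capa(bin_capacities, elements):
--     bins = [[] for _ in bin_capacities]
--     # priority structure: one (-free_space, bin_index) cell per in-use bin,
--     # kept sorted ascending, so avail[0] is always the worst-fit bin
--     # (maximum free space, lowest index on ties) -- no scan per element.
--     avail = []
--     for i, c in enumerate(bin_capacities):
--         _insort(avail, (-c, i))
--     for elem in elements:
--         if not avail or -avail[0][0] < elem:
--             return False, bins
--         negf, i = avail[0]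
--         avail = avail[1:]
--         bins[i].append(elem)
--         f = -negf - elem
--         if f != 0:
--             _insort(avail, (-f, i))
--     return True, bins
-- ===== Notes on version B (the rewrite author's own statement) =====
-- stated objective: faster
-- what changed: B replaces A's per-element scan over all in-use bins (which re-sums every bin's contents for every probe) by a priority structure: a list of (-free_space, bin_index) cells kept sorted with hand-written binary-search insertion, whose head is always the worst-fit bin (max free space, lowest index on ties).
import Mathlib
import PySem

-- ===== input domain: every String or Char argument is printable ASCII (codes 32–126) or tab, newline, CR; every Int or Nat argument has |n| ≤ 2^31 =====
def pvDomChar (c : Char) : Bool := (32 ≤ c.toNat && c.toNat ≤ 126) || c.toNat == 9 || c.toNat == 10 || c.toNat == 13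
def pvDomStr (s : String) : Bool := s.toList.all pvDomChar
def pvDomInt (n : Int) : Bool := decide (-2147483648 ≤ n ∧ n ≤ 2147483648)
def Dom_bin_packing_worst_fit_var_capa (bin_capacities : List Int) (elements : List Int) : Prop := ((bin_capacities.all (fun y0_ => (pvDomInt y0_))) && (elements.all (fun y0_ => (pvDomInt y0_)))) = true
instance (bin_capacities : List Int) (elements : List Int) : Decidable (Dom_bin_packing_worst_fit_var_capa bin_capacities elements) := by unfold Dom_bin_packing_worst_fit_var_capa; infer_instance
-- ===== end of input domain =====

-- B replaces A's scan over all in-use bins (re-summing bin contents per probe) by a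
-- priority structure: a list of (-free, index) cells kept sorted by binary-search
-- insertion, whose head is always the worst-fit bin; objective: faster.

-- ===== PORT A =====
-- the body of A's inner for-loop over bins_in_use (b = bins_in_use[i])
def aStep (caps : List Int) (bins : List (List Int)) (elem : Int) (w : Int × Int) (b : Int) : Int × Int :=
  if PySem.List.pyGetD caps b 0 - ((PySem.List.pyGetD bins b []).sum + elem) ≥ 0 ∧
     PySem.List.pyGetD caps b 0 - ((PySem.List.pyGetD bins b []).sum + elem) > w.2
  then (b, PySem.List.pyGetD caps b 0 - ((PySem.List.pyGetD bins b []).sum + elem)) else w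

-- A's inner loop: for i in range(len(bins_in_use)), state (worst_bin, worst_remaining_capacity)
def aInner (caps : List Int) (bins : List (List Int)) (u : List Int) (elem : Int) : Int × Int :=
  (PySem.List.pyRange 0 (PySem.List.len u)).foldl
    (fun w i => aStep caps bins elem w (PySem.List.pyGetD u i 0)) (-1, -1)

-- A's outer loop over elements; state: bins, bins_in_use
def aLoop (caps : List Int) : List (List Int) → List Int → List Int → Bool × List (List Int)
  | bins, _, [] => (true, bins)
  | bins, u, elem :: rest =>
    let w := aInner caps bins u elem
    if w.1 ≠ -1 then
      aLoop caps
        (PySem.List.pySetD bins w.1 (PySem.List.pyGetD bins w.1 [] ++ [elem]))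
        (if w.2 = 0 then (PySem.List.remove? u w.1).getD u else u)
        rest
    else (false, bins)

def bin_packing_worst_fit_var_capa (bin_capacities : List Int) (elements : List Int) : Bool × List (List Int) :=
  -- max_capacity = max(bin_capacities): unused, but raises ValueError on [] (excluded by Pre_)
  match PySem.List.max? bin_capacities (fun x => x) with
  | none => (false, [])
  | some _ =>
    aLoop bin_capacities (List.replicate bin_capacities.length [])
      (PySem.List.pyRange 0 (PySem.List.len bin_capacities)) elements

-- ===== PORT B =====
-- Python's tuple '<' on int pairs is lexicographic; ported explicitly (exact on int pairs)
def pvTlt (a b : Int × Int) : Bool := a.1 < b.1 || (a.1 == b.1 && a.2 < b.2)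

-- _insort's while-loop: binary search for q's insertion point in s between lo and hi
def insortPos (s : List (Int × Int)) (q : Int × Int) (lo hi : Int) : Int :=
  if h : lo < hi then
    if pvTlt (PySem.List.pyGetD s (PySem.Int.floordiv (lo + hi) 2) (0, 0)) q
    then insortPos s q (PySem.Int.floordiv (lo + hi) 2 + 1) hi
    else insortPos s q lo (PySem.Int.floordiv (lo + hi) 2)
  else lo
termination_by (hi - lo).toNat
decreasing_by
  · have h1 := PySem.Int.floordiv_two_mid_bounds (le_of_lt h)
    omega
  · have h1 := PySem.Int.floordiv_two_mid_bounds (le_of_lt h)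
    have h2 := (PySem.Int.floordiv_lt_iff_lt_mul (a := lo + hi) (b := 2) (q := hi) (by omega)).mpr (by omega)
    omega

-- _insort(s, q): s.insert(lo, q) at the found position
def pvInsort (s : List (Int × Int)) (q : Int × Int) : List (Int × Int) :=
  PySem.List.insert s (insortPos s q 0 (PySem.List.len s)) q

-- B's loop over elements; avail = ascending list of (-free_space, bin_index) cells of in-use bins
def bLoop : List (List Int) → List (Int × Int) → List Int → Bool × List (List Int)
  | bins, _, [] => (true, bins)
  | bins, [], _ :: _ => (false, bins)
  | bins, (negf, i) :: tail, elem :: rest =>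
    if -negf < elem then (false, bins)
    else
      let f := -negf - elem
      bLoop (PySem.List.pySetD bins i (PySem.List.pyGetD bins i [] ++ [elem]))
        (if f ≠ 0 then pvInsort tail (-f, i) else tail) rest

def bin_packing_worst_fit_var_capa_alt (bin_capacities : List Int) (elements : List Int) : Bool × List (List Int) :=
  bLoop (List.replicate bin_capacities.length [])
    ((PySem.List.enumerate bin_capacities).foldl (fun s p => pvInsort s (-p.2, p.1)) [])
    elements

-- ===== PRECONDITION & SPEC =====
-- A's `max(bin_capacities)` raises ValueError on an empty capacity list; nothing else raises.
def Pre_bin_packing_worst_fit_var_capa (bin_capacities : List Int) (elements : List Int) : Prop :=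
  bin_capacities ≠ []
instance (bin_capacities : List Int) (elements : List Int) : Decidable (Pre_bin_packing_worst_fit_var_capa bin_capacities elements) := by unfold Pre_bin_packing_worst_fit_var_capa; infer_instance
def pvWitness_bin_packing_worst_fit_var_capa : List Int × List Int := ([3, 5], [2, 1, 4])

def Spec_bin_packing_worst_fit_var_capa (bin_capacities : List Int) (elements : List Int) (out : Bool × List (List Int)) : Prop := out = bin_packing_worst_fit_var_capa_alt bin_capacities elements
instance (bin_capacities : List Int) (elements : List Int) (out : Bool × List (List Int)) : Decidable (Spec_bin_packing_worst_fit_var_capa bin_capacities elements out) := by unfold Spec_bin_packing_worst_fit_var_capa; infer_instance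

-- ===== CLAIM (what is proved, stated in full; the proofs are below) =====
def Claim_equal_bin_packing_worst_fit_var_capa : Prop := ∀ (bin_capacities : List Int) (elements : List Int), Dom_bin_packing_worst_fit_var_capa bin_capacities elements → Pre_bin_packing_worst_fit_var_capa bin_capacities elements → Spec_bin_packing_worst_fit_var_capa bin_capacities elements (bin_packing_worst_fit_var_capa bin_capacities elements)

-- ===== LEMMAS AND PROOFS =====

-- free space of bin b (Python: bin_capacities[b] - sum(bins[b]))
def pvSl (caps : List Int) (bins : List (List Int)) (b : Int) : Int :=
  PySem.List.pyGetD caps b 0 - (PySem.List.pyGetD bins b []).sum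

def pvF (caps : List Int) (bins : List (List Int)) (i : Int) : Int × Int := (i, pvSl caps bins i)

-- B's sort key for bin i: (-free_space, index)
def negF (caps : List Int) (bins : List (List Int)) (i : Int) : Int × Int := (-(pvSl caps bins i), i)

-- the bin A's inner scan selects: running "first strict maximum of free space" over u = a :: t
def wMin (caps : List Int) (bins : List (List Int)) (a : Int) (t : List Int) : Int :=
  t.foldl (fun m b => if pvSl caps bins m < pvSl caps bins b then b else m) a

def wfStep (sl : Int → Int) (elem : Int) (w : Int × Int) (b : Int) : Int × Int :=
  if sl b - elem ≥ 0 ∧ sl b - elem > w.2 then (b, sl b - elem) else w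

lemma aStep_eq (caps : List Int) (bins : List (List Int)) (elem : Int) :
    aStep caps bins elem = wfStep (pvSl caps bins) elem := by
  funext w b
  have h : PySem.List.pyGetD caps b 0 - ((PySem.List.pyGetD bins b []).sum + elem)
      = pvSl caps bins b - elem := by unfold pvSl; ring
  simp only [aStep, wfStep, h]

lemma max?_cons_fold {α κ : Type} [LT κ] [DecidableLT κ] (key : α → κ) (x : α) (xs : List α) :
    PySem.List.max? (x :: xs) key
      = some (xs.foldl (fun m y => if key m < key y then y else m) x) := by
  suffices h : ∀ (xs : List α) (x : α),
      List.foldl (fun acc y => match acc with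
        | none => some y
        | some m => if key m < key y then some y else some m) (some x) xs
      = some (xs.foldl (fun m y => if key m < key y then y else m) x) by
    simpa [PySem.List.max?] using h xs x
  intro xs
  induction xs with
  | nil => intro x; rfl
  | cons y t ih =>
    intro x
    simp only [List.foldl_cons]
    by_cases h : key x < key y <;> simp [h, ih]

lemma fold_rel (sl : Int → Int) (elem : Int) :
    ∀ (u : List Int) (q : Int × Int),
      u.foldl (wfStep sl elem) (if elem ≤ q.2 then (q.1, q.2 - elem) else (-1, -1))
        = (if elem ≤ (u.foldl (fun m b => if m.2 < sl b then (b, sl b) else m) q).2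
           then ((u.foldl (fun m b => if m.2 < sl b then (b, sl b) else m) q).1,
                 (u.foldl (fun m b => if m.2 < sl b then (b, sl b) else m) q).2 - elem)
           else (-1, -1)) := by
  intro u
  induction u with
  | nil => intro q; rfl
  | cons b t ih =>
    intro q
    simp only [List.foldl_cons]
    have hstep : wfStep sl elem (if elem ≤ q.2 then (q.1, q.2 - elem) else (-1, -1)) b
        = (if elem ≤ (if q.2 < sl b then (b, sl b) else q).2
           then ((if q.2 < sl b then (b, sl b) else q).1,
                 (if q.2 < sl b then (b, sl b) else q).2 - elem)
           else (-1, -1)) := by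
      unfold wfStep
      split_ifs <;> simp_all <;> omega
    rw [hstep, ih (if q.2 < sl b then (b, sl b) else q)]

lemma inner_eq (caps : List Int) (bins : List (List Int)) (u : List Int) (elem : Int) :
    aInner caps bins u elem =
      (match PySem.List.max? (u.map (pvF caps bins)) (fun q => q.2) with
       | none => (-1, -1)
       | some p => if elem ≤ p.2 then (p.1, p.2 - elem) else (-1, -1)) := by
  unfold aInner
  rw [PySem.List.foldl_pyRange_zero_pyGetD u 0 (aStep caps bins elem) (-1, -1),
      aStep_eq]
  cases u with
  | nil => simp [PySem.List.max?]
  | cons b t =>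
    rw [List.map_cons, max?_cons_fold, List.foldl_map]
    simp only [List.foldl_cons]
    have hinit : wfStep (pvSl caps bins) elem (-1, -1) b
        = (if elem ≤ (pvF caps bins b).2 then ((pvF caps bins b).1, (pvF caps bins b).2 - elem)
           else (-1, -1)) := by
      unfold wfStep pvF
      split_ifs <;> simp_all <;> omega
    rw [hinit, fold_rel (pvSl caps bins) elem t (pvF caps bins b)]
    rfl

-- A's inner-loop result is pvF of wMin
lemma foldl_pvF (caps : List Int) (bins : List (List Int)) :
    ∀ (t : List Int) (a : Int),
      t.foldl (fun m b => if m.2 < (pvF caps bins b).2 then pvF caps bins b else m) (pvF caps bins a)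
        = pvF caps bins (wMin caps bins a t) := by
  intro t
  induction t with
  | nil => intro a; rfl
  | cons b t ih =>
    intro a
    simp only [List.foldl_cons]
    have : (if (pvF caps bins a).2 < (pvF caps bins b).2 then pvF caps bins b else pvF caps bins a)
        = pvF caps bins (if pvSl caps bins a < pvSl caps bins b then b else a) := by
      unfold pvF; split_ifs <;> rfl
    rw [this]
    exact ih _

lemma max?_map_pvF (caps : List Int) (bins : List (List Int)) (a : Int) (t : List Int) :
    PySem.List.max? ((a :: t).map (pvF caps bins)) (fun q => q.2)
      = some (pvF caps bins (wMin caps bins a t)) := by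
  rw [List.map_cons, max?_cons_fold, List.foldl_map, foldl_pvF]

lemma wMin_mem (caps : List Int) (bins : List (List Int)) :
    ∀ (t : List Int) (a : Int), wMin caps bins a t ∈ a :: t := by
  intro t
  induction t with
  | nil => intro a; simp [wMin]
  | cons b t ih =>
    intro a
    rw [show wMin caps bins a (b :: t)
          = wMin caps bins (if pvSl caps bins a < pvSl caps bins b then b else a) t from rfl]
    rcases List.mem_cons.mp (ih (if pvSl caps bins a < pvSl caps bins b then b else a)) with h | h
    · rw [h]; split_ifs <;> simp
    · simp [h]

-- the selected bin beats every other in-use bin: strictly more free space, or equal free space and lower index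
lemma wMin_beats (caps : List Int) (bins : List (List Int)) :
    ∀ (t : List Int) (a : Int), (a :: t).Pairwise (· < ·) →
      ∀ i ∈ a :: t, i ≠ wMin caps bins a t →
        pvSl caps bins i < pvSl caps bins (wMin caps bins a t) ∨
        (pvSl caps bins i = pvSl caps bins (wMin caps bins a t) ∧ wMin caps bins a t < i) := by
  intro t
  induction t with
  | nil =>
    intro a _ i hi hne
    simp only [List.mem_singleton] at hi
    exact absurd (hi.trans rfl) hne
  | cons b t ih =>
    intro a hpw i hi hne
    obtain ⟨ha, hpw'⟩ := List.pairwise_cons.mp hpw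
    obtain ⟨hb, hpt⟩ := List.pairwise_cons.mp hpw'
    have hab : a < b := ha b (List.mem_cons_self)
    set g := if pvSl caps bins a < pvSl caps bins b then b else a with hg
    set o := if pvSl caps bins a < pvSl caps bins b then a else b with ho
    have hw : wMin caps bins a (b :: t) = wMin caps bins g t := rfl
    have hpwg : (g :: t).Pairwise (· < ·) := by
      refine List.pairwise_cons.mpr ⟨?_, hpt⟩
      intro x hx
      rw [hg]; split_ifs
      · exact hb x hx
      · exact ha x (List.mem_cons_of_mem _ hx)
    have hgo : pvSl caps bins o < pvSl caps bins g ∨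
        (pvSl caps bins o = pvSl caps bins g ∧ g < o) := by
      rw [hg, ho]; split_ifs with h
      · exact Or.inl h
      · by_cases h2 : pvSl caps bins b < pvSl caps bins a
        · exact Or.inl h2
        · exact Or.inr ⟨by omega, hab⟩
    rw [hw] at hne ⊢
    have hio : i = o ∨ i ∈ g :: t := by
      rcases List.mem_cons.mp hi with h | h
      · rw [ho, hg]; split_ifs <;> simp [h]
      · rcases List.mem_cons.mp h with h | h
        · rw [ho, hg]; split_ifs <;> simp [h]
        · right; exact List.mem_cons_of_mem _ h
    rcases hio with rfl | hig
    · -- i = o; o is not in g :: t, so o ≠ wMin g t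
      by_cases hwg : wMin caps bins g t = g
      · rw [hwg]; exact hgo
      · have hgmem : (g : Int) ∈ g :: t := List.mem_cons_self
        have hPg := ih g hpwg g hgmem (fun h => hwg h.symm)
        omega
    · exact ih g hpwg i hig hne

-- pvTlt on keys, arithmetically
lemma tlt_negF (caps : List Int) (bins : List (List Int)) (i j : Int) :
    pvTlt (negF caps bins i) (negF caps bins j) = true ↔
      (pvSl caps bins j < pvSl caps bins i ∨ (pvSl caps bins i = pvSl caps bins j ∧ i < j)) := by
  simp only [pvTlt, negF, Bool.or_eq_true, Bool.and_eq_true, decide_eq_true_eq, beq_iff_eq]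
  omega

lemma tlt_trans {x y z : Int × Int} (h1 : pvTlt x y = true) (h2 : pvTlt y z = true) :
    pvTlt x z = true := by
  simp only [pvTlt, Bool.or_eq_true, Bool.and_eq_true, decide_eq_true_eq, beq_iff_eq] at *
  omega

lemma tlt_total {x y : Int × Int} (h : x.2 ≠ y.2) : pvTlt x y = true ∨ pvTlt y x = true := by
  simp only [pvTlt, Bool.or_eq_true, Bool.and_eq_true, decide_eq_true_eq, beq_iff_eq]
  omega

-- the head of the sorted avail list is the key of A's selected bin
lemma head_wMin (caps : List Int) (bins : List (List Int)) (a : Int) (t : List Int)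
    (hupw : (a :: t).Pairwise (· < ·)) (c : Int × Int) (tail : List (Int × Int))
    (hs : (c :: tail).Pairwise (fun x y => pvTlt x y = true))
    (hperm : (c :: tail).Perm ((a :: t).map (negF caps bins))) :
    c = negF caps bins (wMin caps bins a t) := by
  set w := wMin caps bins a t with hwdef
  have hwmem : w ∈ a :: t := wMin_mem caps bins t a
  have hwin : negF caps bins w ∈ c :: tail := hperm.mem_iff.mpr (List.mem_map_of_mem hwmem)
  have hcin : c ∈ (a :: t).map (negF caps bins) := hperm.mem_iff.mp List.mem_cons_self
  obtain ⟨j0, hj0, hcj0⟩ := List.mem_map.mp hcin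
  rcases List.mem_cons.mp hwin with heq | hmem
  · exact heq.symm
  · exfalso
    have h1 : pvTlt c (negF caps bins w) = true :=
      (List.pairwise_cons.mp hs).1 _ hmem
    have hj0w : j0 ≠ w := by
      intro h; subst h
      rw [← hcj0] at h1
      simp [pvTlt] at h1
    have hbeats := wMin_beats caps bins t a hupw j0 hj0 hj0w
    rw [← hcj0, tlt_negF] at h1
    rw [← hwdef] at hbeats
    omega

-- ---- correctness of the binary-search insertion ----

def linsort (q : Int × Int) : List (Int × Int) → List (Int × Int)
  | [] => [q]
  | b :: t => if pvTlt b q then b :: linsort q t else q :: b :: t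

lemma linsort_eq_take_drop (q : Int × Int) :
    ∀ s : List (Int × Int),
      linsort q s = s.takeWhile (fun b => pvTlt b q) ++ q :: s.dropWhile (fun b => pvTlt b q) := by
  intro s
  induction s with
  | nil => rfl
  | cons b t ih =>
    by_cases h : pvTlt b q <;> simp [linsort, List.takeWhile_cons, List.dropWhile_cons, h, ih]

-- the element just past the takeWhile prefix fails the predicate
lemma getElem_length_takeWhile {α : Type} (p : α → Bool) :
    ∀ (s : List α) (h : (s.takeWhile p).length < s.length),
      p (s[(s.takeWhile p).length]) = false := by
  intro s
  induction s with
  | nil => intro h; simp at h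
  | cons b t ih =>
    intro h
    by_cases hb : p b
    · rw [List.takeWhile_cons_of_pos hb] at h
      simp only [List.takeWhile_cons_of_pos hb, List.length_cons, List.getElem_cons_succ]
      exact ih (by simpa using h)
    · simp only [List.takeWhile_cons_of_neg (by simpa using hb), List.length_nil,
        List.getElem_cons_zero]
      simpa using hb

lemma pred_getElem_of_lt_takeWhile {α : Type} (p : α → Bool) :
    ∀ (s : List α) (k : Nat), k < (s.takeWhile p).length → ∀ (hks : k < s.length),
      p (s[k]) = true := by
  intro s
  induction s with
  | nil => intro k _ hks; simp at hks
  | cons b t ih =>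
    intro k hkT hks
    by_cases hb : p b
    · rw [List.takeWhile_cons_of_pos hb] at hkT
      cases k with
      | zero => simpa using hb
      | succ k =>
        simp only [List.getElem_cons_succ]
        exact ih k (by simpa using hkT) (by simpa using hks)
    · rw [List.takeWhile_cons_of_neg (by simpa using hb)] at hkT
      simp at hkT

lemma insortPos_eq (s : List (Int × Int)) (q : Int × Int)
    (hs : s.Pairwise (fun x y => pvTlt x y = true)) :
    ∀ (lo hi : Int), 0 ≤ lo → lo ≤ ((s.takeWhile (fun b => pvTlt b q)).length : Int) →
      ((s.takeWhile (fun b => pvTlt b q)).length : Int) ≤ hi → hi ≤ (s.length : Int) →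
      insortPos s q lo hi = ((s.takeWhile (fun b => pvTlt b q)).length : Int) := by
  set T := (s.takeWhile (fun b => pvTlt b q)).length with hT
  have fa : ∀ k : Nat, k < T → ∀ (hk : k < s.length), pvTlt s[k] q = true := by
    intro k hkT hk
    exact pred_getElem_of_lt_takeWhile _ s k hkT hk
  have fb : ∀ k : Nat, T ≤ k → ∀ (hk : k < s.length), pvTlt s[k] q = false := by
    intro k hkT hk
    have hTlen : T < s.length := by omega
    have hTf : pvTlt s[T] q = false := getElem_length_takeWhile _ s hTlen
    rcases Nat.eq_or_lt_of_le hkT with rfl | hlt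
    · exact hTf
    · by_contra hcon
      have hk' : pvTlt s[k] q = true := by
        revert hcon; cases pvTlt s[k] q <;> simp
      have hTk : pvTlt s[T] s[k] = true :=
        List.pairwise_iff_getElem.mp hs T k hTlen hk hlt
      rw [tlt_trans hTk hk'] at hTf
      exact Bool.noConfusion hTf
  have main : ∀ (n : Nat) (lo hi : Int), (hi - lo).toNat = n → 0 ≤ lo → lo ≤ (T : Int) →
      (T : Int) ≤ hi → hi ≤ (s.length : Int) → insortPos s q lo hi = (T : Int) := by
    intro n
    induction n using Nat.strong_induction_on with
    | _ n ih =>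
      intro lo hi hn h0 h1 h2 h3
      rw [insortPos]
      by_cases hlt : lo < hi
      · rw [dif_pos hlt]
        have hb := PySem.Int.floordiv_two_mid_bounds (le_of_lt hlt)
        have hmidlt : PySem.Int.floordiv (lo + hi) 2 < hi :=
          (PySem.Int.floordiv_lt_iff_lt_mul (by omega)).mpr (by omega)
        set mid := PySem.Int.floordiv (lo + hi) 2 with hmid
        have hmlen : mid < (s.length : Int) := by omega
        rw [PySem.List.pyGetD_eq_getElem s (0, 0) (by omega) hmlen]
        by_cases hc : pvTlt s[mid.toNat] q = true
        · rw [if_pos hc]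
          have hmT : mid < (T : Int) := by
            by_contra hcon
            have hmf : pvTlt s[mid.toNat] q = false := fb mid.toNat (by omega) (by omega)
            rw [hc] at hmf
            exact Bool.noConfusion hmf
          exact ih ((hi - (mid + 1)).toNat) (by omega) (mid + 1) hi rfl (by omega) (by omega) h2 h3
        · rw [if_neg hc]
          have hmT : (T : Int) ≤ mid := by
            by_contra hcon
            exact hc (fa mid.toNat (by omega) (by omega))
          exact ih ((mid - lo).toNat) (by omega) lo mid rfl h0 h1 hmT (by omega)
      · rw [dif_neg hlt]
        omega
  intro lo hi h0 h1 h2 h3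
  exact main ((hi - lo).toNat) lo hi rfl h0 h1 h2 h3

lemma take_length_takeWhile {α : Type} {p : α → Bool} :
    ∀ s : List α, s.take (s.takeWhile p).length = s.takeWhile p := by
  intro s
  induction s with
  | nil => rfl
  | cons b t ih =>
    by_cases hb : p b
    · rw [List.takeWhile_cons_of_pos hb]
      simpa using ih
    · rw [List.takeWhile_cons_of_neg (by simpa using hb)]
      rfl

lemma drop_length_takeWhile {α : Type} {p : α → Bool} :
    ∀ s : List α, s.drop (s.takeWhile p).length = s.dropWhile p := by
  intro s
  induction s with
  | nil => rfl
  | cons b t ih =>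
    by_cases hb : p b
    · rw [List.takeWhile_cons_of_pos hb, List.dropWhile_cons_of_pos hb]
      simpa using ih
    · rw [List.takeWhile_cons_of_neg (by simpa using hb),
          List.dropWhile_cons_of_neg (by simpa using hb)]
      rfl

lemma insort_eq_linsort (s : List (Int × Int)) (q : Int × Int)
    (hs : s.Pairwise (fun x y => pvTlt x y = true)) :
    pvInsort s q = linsort q s := by
  have hTle : (s.takeWhile (fun b => pvTlt b q)).length ≤ s.length :=
    (List.takeWhile_prefix _).length_le
  have hlen : PySem.List.len s = (s.length : Int) := rfl
  have hpos : insortPos s q 0 (PySem.List.len s)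
      = ((s.takeWhile (fun b => pvTlt b q)).length : Int) := by
    rw [hlen]
    exact insortPos_eq s q hs 0 (s.length : Int) le_rfl (by exact_mod_cast Nat.zero_le _)
      (by exact_mod_cast hTle) le_rfl
  unfold pvInsort
  rw [hpos, PySem.List.insert_natCast s _ q hTle, linsort_eq_take_drop]
  rw [take_length_takeWhile, drop_length_takeWhile]

lemma linsort_perm (q : Int × Int) : ∀ s : List (Int × Int), (linsort q s).Perm (q :: s) := by
  intro s
  induction s with
  | nil => exact List.Perm.refl _
  | cons b t ih =>
    by_cases h : pvTlt b q
    · simp only [linsort, if_pos h]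
      exact (ih.cons b).trans (List.Perm.swap q b t)
    · simp only [linsort, if_neg h]
      exact List.Perm.refl _

lemma linsort_pairwise (q : Int × Int) :
    ∀ s : List (Int × Int), s.Pairwise (fun x y => pvTlt x y = true) →
      (∀ b ∈ s, b.2 ≠ q.2) → (linsort q s).Pairwise (fun x y => pvTlt x y = true) := by
  intro s
  induction s with
  | nil => intro _ _; simp [linsort]
  | cons b t ih =>
    intro hs hne
    obtain ⟨hb, ht⟩ := List.pairwise_cons.mp hs
    by_cases h : pvTlt b q
    · simp only [linsort, if_pos h]
      refine List.pairwise_cons.mpr ⟨?_, ih ht (fun x hx => hne x (List.mem_cons_of_mem _ hx))⟩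
      intro x hx
      rcases List.mem_cons.mp ((linsort_perm q t).mem_iff.mp hx) with rfl | hxt
      · exact h
      · exact hb x hxt
    · simp only [linsort, if_neg h]
      have hqb : pvTlt q b = true := by
        rcases tlt_total (x := b) (y := q) (hne b List.mem_cons_self) with h' | h'
        · exact absurd h' h
        · exact h'
      refine List.pairwise_cons.mpr ⟨?_, hs⟩
      intro x hx
      rcases List.mem_cons.mp hx with rfl | hxt
      · exact hqb
      · exact tlt_trans hqb (hb x hxt)

lemma pvSl_set (caps : List Int) (bins : List (List Int)) (j : Int) (elem : Int)
    (h0 : 0 ≤ j) (h1 : j < (bins.length : Int)) (i : Int)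
    (hi0 : 0 ≤ i) (hi1 : i < (bins.length : Int)) :
    pvSl caps (PySem.List.pySetD bins j (PySem.List.pyGetD bins j [] ++ [elem])) i
      = if i = j then pvSl caps bins i - elem else pvSl caps bins i := by
  unfold pvSl
  rw [PySem.List.pySetD_of_nonneg _ _ h0]
  have hi1' : i < (((bins.set j.toNat (PySem.List.pyGetD bins j [] ++ [elem])).length : Nat) : Int) := by
    simpa using hi1
  rw [PySem.List.pyGetD_eq_getElem (bins.set j.toNat _) ([] : List Int) hi0 hi1',
      List.getElem_set]
  by_cases h : i = j
  · subst h
    rw [if_pos rfl, if_pos rfl]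
    simp only [List.sum_append, List.sum_cons, List.sum_nil]
    ring
  · have hnat : ¬ (i.toNat = j.toNat) := by omega
    rw [if_neg (fun hh => hnat hh.symm), if_neg h,
        PySem.List.pyGetD_eq_getElem bins ([] : List Int) hi0 hi1]

lemma negF_inj (caps : List Int) (bins : List (List Int)) :
    Function.Injective (negF caps bins) := by
  intro a b h
  simpa [negF] using congrArg Prod.snd h

lemma perm_map_update (g : Int → Int × Int) (u : List Int) (j : Int) (hj : j ∈ u)
    (hnd : u.Nodup) (c : Int × Int) :
    (u.map (fun i => if i = j then c else g i)).Perm (c :: (u.erase j).map g) := by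
  have h1 : (u.map (fun i => if i = j then c else g i)).Perm
      ((j :: u.erase j).map (fun i => if i = j then c else g i)) :=
    (List.perm_cons_erase hj).map _
  have h2 : (u.erase j).map (fun i => if i = j then c else g i) = (u.erase j).map g := by
    apply List.map_congr_left
    intro x hx
    have hxj : x ≠ j := ((List.Nodup.mem_erase_iff hnd).mp hx).1
    simp [hxj]
  rw [List.map_cons, if_pos rfl, h2] at h1
  exact h1

-- main loop invariant: B's avail is exactly the sorted (-free, index) view of A's bins_in_use
lemma loop_eq (caps : List Int) :
    ∀ (elems : List Int) (bins : List (List Int)) (u : List Int) (avail : List (Int × Int)),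
      bins.length = caps.length →
      u.Pairwise (· < ·) →
      (∀ i ∈ u, 0 ≤ i ∧ i < (caps.length : Int)) →
      avail.Pairwise (fun x y => pvTlt x y = true) →
      avail.Perm (u.map (negF caps bins)) →
      aLoop caps bins u elems = bLoop bins avail elems := by
  intro elems
  induction elems with
  | nil =>
    intro bins u avail _ _ _ _ _
    rcases avail with _ | ⟨⟨nf, i⟩, tl⟩ <;> rfl
  | cons elem rest ih =>
    intro bins u avail hlen hupw hbd hav hperm
    cases u with
    | nil =>
      have havnil : avail = [] := by simpa using hperm
      subst havnil
      simp only [aLoop, inner_eq, List.map_nil]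
      simp [PySem.List.max?, bLoop]
    | cons a t =>
      rcases avail with _ | ⟨c, tail⟩
      · exact absurd (List.Perm.nil_eq hperm).symm (by simp)
      have hc : c = negF caps bins (wMin caps bins a t) := head_wMin caps bins a t hupw c tail hav hperm
      set w := wMin caps bins a t with hwdef
      obtain ⟨hw0, hwlt⟩ := hbd w (wMin_mem caps bins t a)
      obtain ⟨negf, i0⟩ := c
      have hnegf : negf = -(pvSl caps bins w) := by
        simpa [negF] using congrArg Prod.fst hc
      have hi0 : i0 = w := by simpa [negF] using congrArg Prod.snd hc
      subst hnegf hi0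
      simp only [aLoop, inner_eq, max?_map_pvF, bLoop, neg_neg, ← hwdef, pvF]
      by_cases hfit : elem ≤ pvSl caps bins w
      · -- the worst bin fits
        rw [if_pos hfit]
        dsimp only
        rw [if_pos (show (w : Int) ≠ -1 by omega),
            if_neg (show ¬ pvSl caps bins w < elem by omega)]
        have hlt' : w < (bins.length : Int) := by rw [hlen]; exact hwlt
        set bins' := PySem.List.pySetD bins w (PySem.List.pyGetD bins w [] ++ [elem]) with hbins'
        have hlen' : bins'.length = caps.length := by
          rw [hbins', PySem.List.length_pySetD, hlen]
        have hndu : (a :: t).Nodup := List.Pairwise.imp (fun h => ne_of_lt h) hupw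
        have hwmem : w ∈ a :: t := wMin_mem caps bins t a
        have hnegF' : ∀ i ∈ a :: t, negF caps bins' i
            = if i = w then (-(pvSl caps bins w - elem), w) else negF caps bins i := by
          intro i hi
          obtain ⟨hi0', hilt⟩ := hbd i hi
          unfold negF
          rw [hbins', pvSl_set caps bins w elem hw0 hlt' i hi0' (by rw [hlen]; exact hilt)]
          by_cases h : i = w
          · subst h; simp
          · simp [h]
        have htail_pw : tail.Pairwise (fun x y => pvTlt x y = true) :=
          (List.pairwise_cons.mp hav).2
        have htail_perm : tail.Perm (((a :: t).erase w).map (negF caps bins)) := by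
          have h1 := hperm.erase (negF caps bins w)
          rw [show ((-(pvSl caps bins w), w) :: tail) = negF caps bins w :: tail from by
                simp [negF]] at h1
          rw [List.erase_cons_head] at h1
          rw [List.map_erase (negF_inj caps bins)]
          exact h1
        have herase_congr : ((a :: t).erase w).map (negF caps bins')
            = ((a :: t).erase w).map (negF caps bins) := by
          apply List.map_congr_left
          intro x hx
          have hxw : x ≠ w := ((List.Nodup.mem_erase_iff hndu).mp hx).1
          rw [hnegF' x (List.mem_of_mem_erase hx), if_neg hxw]
        have htail_perm' : tail.Perm (((a :: t).erase w).map (negF caps bins')) := by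
          rw [herase_congr]; exact htail_perm
        by_cases hfull : pvSl caps bins w - elem = 0
        · -- bin becomes exactly full: both drop it
          rw [if_pos hfull, if_neg (by omega : ¬ (pvSl caps bins w - elem ≠ 0))]
          rw [PySem.List.remove?_eq_some_erase (a :: t) w hwmem, Option.getD_some]
          exact ih bins' ((a :: t).erase w) tail hlen'
            (List.Pairwise.sublist (List.erase_sublist) hupw)
            (fun i hi => hbd i (List.mem_of_mem_erase hi))
            htail_pw htail_perm'
        · -- bin stays in use: B re-inserts its updated cell
          rw [if_neg hfull, if_pos (by omega : pvSl caps bins w - elem ≠ 0)]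
          rw [insort_eq_linsort tail _ htail_pw]
          have hmap2 : (a :: t).map (negF caps bins')
              = (a :: t).map (fun i => if i = w then (-(pvSl caps bins w - elem), w)
                                       else negF caps bins' i) := by
            apply List.map_congr_left
            intro i hi
            by_cases h : i = w
            · rw [if_pos h, hnegF' i hi, if_pos h]
            · rw [if_neg h]
          have hupd : (linsort (-(pvSl caps bins w - elem), w) tail).Perm
              ((a :: t).map (negF caps bins')) := by
            refine (linsort_perm _ tail).trans ?_
            refine (htail_perm'.cons _).trans ?_
            rw [hmap2]
            exact (perm_map_update (negF caps bins') (a :: t) w hwmem hndu _).symm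
          have hpw' : (linsort (-(pvSl caps bins w - elem), w) tail).Pairwise
              (fun x y => pvTlt x y = true) := by
            refine linsort_pairwise _ tail htail_pw ?_
            intro b hb
            obtain ⟨x, hx, hbx⟩ := List.mem_map.mp (htail_perm.mem_iff.mp hb)
            have hxw : x ≠ w := ((List.Nodup.mem_erase_iff hndu).mp hx).1
            rw [← hbx]
            simpa [negF] using hxw
          exact ih bins' (a :: t) _ hlen' hupw hbd hpw' hupd
      · -- nothing fits: both return (False, bins)
        rw [if_neg hfit, if_pos (show pvSl caps bins w < elem by omega)]
        simp

-- building the initial avail by repeated _insort: sorted, and a permutation of the cells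
lemma foldl_insort_inv :
    ∀ (cs : List (Int × Int)) (s : List (Int × Int)),
      s.Pairwise (fun x y => pvTlt x y = true) →
      (∀ b ∈ s, ∀ p ∈ cs, b.2 ≠ p.1) →
      (cs.map Prod.fst).Nodup →
      (cs.foldl (fun s p => pvInsort s (-p.2, p.1)) s).Pairwise (fun x y => pvTlt x y = true) ∧
      (cs.foldl (fun s p => pvInsort s (-p.2, p.1)) s).Perm
        (cs.map (fun p => (-p.2, p.1)) ++ s) := by
  intro cs
  induction cs with
  | nil => intro s hs _ _; exact ⟨hs, by simp⟩
  | cons cp cs ih =>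
    intro s hs hne hnd
    simp only [List.foldl_cons]
    rw [insort_eq_linsort s _ hs]
    have hnd' : (cp.1 :: cs.map Prod.fst).Nodup := by simpa using hnd
    have hpw' : (linsort (-cp.2, cp.1) s).Pairwise (fun x y => pvTlt x y = true) :=
      linsort_pairwise _ s hs (fun b hb => hne b hb cp List.mem_cons_self)
    have hperm' : (linsort (-cp.2, cp.1) s).Perm ((-cp.2, cp.1) :: s) := linsort_perm _ s
    have hne' : ∀ b ∈ linsort (-cp.2, cp.1) s, ∀ p ∈ cs, b.2 ≠ p.1 := by
      intro b hb p hp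
      rcases List.mem_cons.mp (hperm'.mem_iff.mp hb) with rfl | hbs
      · intro hcon
        apply (List.nodup_cons.mp hnd').1
        have h2 : cp.1 = p.1 := hcon
        rw [h2]
        exact List.mem_map_of_mem hp
      · exact hne b hbs p (List.mem_cons_of_mem _ hp)
    obtain ⟨h1, h2⟩ := ih _ hpw' hne' (List.nodup_cons.mp hnd').2
    refine ⟨h1, h2.trans ?_⟩
    refine (List.Perm.append_left _ hperm').trans ?_
    simpa using List.perm_middle

theorem bin_packing_worst_fit_var_capa_spec : Claim_equal_bin_packing_worst_fit_var_capa := by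
  intro caps elems _ hpre
  unfold Spec_bin_packing_worst_fit_var_capa
  unfold bin_packing_worst_fit_var_capa bin_packing_worst_fit_var_capa_alt
  rcases hmax : PySem.List.max? caps (fun x => x) with _ | mx
  · exact absurd ((PySem.List.max?_eq_none_iff _ _).mp hmax) hpre
  · have hlenc : PySem.List.len caps = ((caps.length : Nat) : Int) := rfl
    have hndfst : ((PySem.List.enumerate caps).map Prod.fst).Nodup := by
      rw [show (PySem.List.enumerate caps).map Prod.fst
            = PySem.List.pyRange 0 (0 + (caps.length : Int)) from
          PySem.List.map_fst_enumerate caps 0]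
      rw [zero_add, PySem.List.pyRange_zero_natCast]
      exact List.Nodup.map (fun a b h => by exact_mod_cast h) List.nodup_range
    obtain ⟨hpw0, hperm0⟩ := foldl_insort_inv (PySem.List.enumerate caps) []
      (by simp) (by simp) hndfst
    have hmapeq : (PySem.List.enumerate caps).map (fun p => (-p.2, p.1))
        = (PySem.List.pyRange 0 (PySem.List.len caps)).map
            (negF caps (List.replicate caps.length [])) := by
      rw [PySem.List.enumerate_eq_map_pyRange caps 0, List.map_map]
      apply List.map_congr_left
      intro j hj
      obtain ⟨hj0, hjlt⟩ := PySem.List.mem_pyRange_one.mp hj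
      have hjlt' : j < ((List.replicate caps.length ([] : List Int)).length : Int) := by
        rw [hlenc] at hjlt; simpa using hjlt
      simp only [Function.comp, negF, pvSl]
      rw [PySem.List.pyGetD_eq_getElem _ ([] : List Int) hj0 hjlt', List.getElem_replicate]
      simp
    refine loop_eq caps elems (List.replicate caps.length [])
      (PySem.List.pyRange 0 (PySem.List.len caps)) _ (by simp) ?pw ?bd hpw0 ?pm
    case pw =>
      rw [hlenc, PySem.List.pyRange_zero_natCast]
      exact List.Pairwise.map _ (fun a b h => by exact_mod_cast h) List.pairwise_lt_range
    case bd =>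
      intro i hi
      obtain ⟨h0, h1⟩ := PySem.List.mem_pyRange_one.mp hi
      exact ⟨h0, by rw [hlenc] at h1; exact h1⟩
    case pm =>
      refine hperm0.trans ?_
      rw [List.append_nil, hmapeq]
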